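-- pv_equiv track=rewrite | github.com/JunsuLime/algorithm-student | baekjoon/p2981.py | get_all_divider
-- ===== SOURCE A (Python) =====
-- import itertools
--
-- def get_all_divider(p):
-- 	d_set = set()
-- 	for i in range(1, len(p)+1):
-- 		for c in itertools.combinations(p, i):
-- 			divider = 1
-- 			for e in c:
-- 				divider *= e
-- 			d_set.add(divider)
-- 	return d_set
-- ===== SOURCE B (Python) =====
-- def get_all_divider(p):
--     # Layered expansion in itertools-combinations order: each subset product is
--     # built from its parent's product by ONE multiplication (no itertools, no
--     # per-subset inner product loop).
--     n = len(p)
--     out = set()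
--     layer = [(1, 0)]
--     for _ in range(n):
--         nxt = []
--         for prod, start in layer:
--             for j in range(start, n):
--                 q = prod * p[j]
--                 out.add(q)
--                 nxt.append((q, j + 1))
--         layer = nxt
--     return out
-- ===== Notes on version B (the rewrite author's own statement) =====
-- stated objective: alternative
-- what changed: Replaces the per-size itertools.combinations enumeration with an explicit layered (BFS) expansion of a (product, next-index) frontier, so each subset product is obtained from its parent's product by a single multiplication instead of re-multiplying the whole combination.
import Mathlib
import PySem

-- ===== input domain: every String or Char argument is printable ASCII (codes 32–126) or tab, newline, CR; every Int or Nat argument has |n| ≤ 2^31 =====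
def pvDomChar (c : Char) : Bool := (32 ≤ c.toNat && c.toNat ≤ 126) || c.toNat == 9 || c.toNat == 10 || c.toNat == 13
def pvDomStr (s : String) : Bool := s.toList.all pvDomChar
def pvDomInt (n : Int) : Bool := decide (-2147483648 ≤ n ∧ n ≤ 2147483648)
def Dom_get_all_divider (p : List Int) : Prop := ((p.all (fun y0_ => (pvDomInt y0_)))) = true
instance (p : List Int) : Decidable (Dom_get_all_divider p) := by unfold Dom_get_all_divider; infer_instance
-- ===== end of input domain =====

-- B replaces A's per-size itertools.combinations enumeration by a layered expansion of a
-- (product, next-index) frontier: one multiplication per generated subset (alternative algorithm).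

-- ===== PORT A =====
def get_all_divider (p : List Int) : List Int :=
  (PySem.List.pyRange 1 ((p.length : Int) + 1) 1).foldl
    (fun d_set i =>
      (PySem.List.combinations p i.toNat).foldl
        (fun d_set c => PySem.Set.add d_set (c.foldl (fun divider e => divider * e) 1))
        d_set)
    PySem.Set.empty

-- ===== PORT B =====
def get_all_divider_alt (p : List Int) : List Int :=
  ((PySem.List.pyRange 0 (p.length : Int) 1).foldl
    (fun st _ =>
      st.2.foldl
        (fun st2 item =>
          (PySem.List.pyRange item.2 (p.length : Int) 1).foldl
            (fun st3 j =>
              let q := item.1 * PySem.List.pyGetD p j 0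
              (PySem.Set.add st3.1 q, st3.2 ++ [(q, j + 1)]))
            st2)
        (st.1, ([] : List (Int × Int))))
    ((PySem.Set.empty : PySem.Set Int), [((1 : Int), (0 : Int))])).1

-- ===== PRECONDITION & SPEC =====
def Spec_get_all_divider (p : List Int) (out : List Int) : Prop := out = get_all_divider_alt p
instance (p : List Int) (out : List Int) : Decidable (Spec_get_all_divider p out) := by unfold Spec_get_all_divider; infer_instance

-- ===== CLAIM (what is proved, stated in full; the proofs are below) =====
def Claim_equal_get_all_divider : Prop := ∀ (p : List Int), Dom_get_all_divider p → Spec_get_all_divider p (get_all_divider p)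

-- ===== LEMMAS AND PROOFS =====

/-- Product as both programs compute it. -/
def prodF (c : List Int) : Int := c.foldl (fun d e => d * e) 1

/-- k-combinations in lex order, paired with the suffix after the last chosen element. -/
def combS : List Int → Nat → List (List Int × List Int)
  | s, 0 => [([], s)]
  | [], _ + 1 => []
  | x :: xs, r + 1 => ((combS xs r).map (fun q => (x :: q.1, q.2))) ++ combS xs (r + 1)

/-- Children of one frontier item: extend the combination by each element of its suffix. -/
def expandC : List Int × List Int → List (List Int × List Int)
  | (_, []) => []
  | (c, x :: xs) => (c ++ [x], xs) :: expandC (c, xs)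

lemma combS_fst (s : List Int) : ∀ r, (combS s r).map Prod.fst = PySem.List.combinations s r := by
  induction s with
  | nil =>
      intro r; cases r with
      | zero => simp [combS, PySem.List.combinations_zero]
      | succ r => simp [combS, PySem.List.combinations_nil_succ]
  | cons x xs ih =>
      intro r; cases r with
      | zero => simp [combS, PySem.List.combinations_zero]
      | succ r =>
          simp only [combS, PySem.List.combinations_cons_succ, List.map_append, List.map_map,
            ← ih r, ← ih (r + 1)]
          congr 1

lemma expandC_cons (x : Int) (c : List Int) (t : List Int) :
    expandC (x :: c, t) = (expandC (c, t)).map (fun q => (x :: q.1, q.2)) := by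
  induction t with
  | nil => simp [expandC]
  | cons y ys ih => simp [expandC, ih]

lemma combS_step (s : List Int) : ∀ r, (combS s r).flatMap expandC = combS s (r + 1) := by
  induction s with
  | nil =>
      intro r; cases r with
      | zero => simp [combS, expandC]
      | succ r => simp [combS]
  | cons x xs ih =>
      intro r; cases r with
      | zero =>
          -- expandC ([], x :: xs) = ([x], xs) :: expandC ([], xs), and expandC ([], xs) = combS xs 1
          have h1 : ∀ t : List Int, expandC (([] : List Int), t) = combS t 1 := by
            intro t
            induction t with
            | nil => simp [expandC, combS]
            | cons y ys ihy => simp [expandC, combS, ihy]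
          simp [combS, expandC, h1 xs]
      | succ r =>
          simp only [combS, List.flatMap_append, List.flatMap_map]
          have h2 : ((combS xs r).flatMap fun q => expandC (x :: q.1, q.2)) =
              ((combS xs r).flatMap expandC).map (fun q => (x :: q.1, q.2)) := by
            rw [List.map_flatMap]
            apply List.flatMap_congr
            intro q _
            exact expandC_cons x q.1 q.2
          rw [h2, ih r, ih (r + 1)]

lemma combS_suffix (s : List Int) : ∀ r q, q ∈ combS s r → q.2.IsSuffix s := by
  induction s with
  | nil =>
      intro r q hq
      cases r with
      | zero => simp [combS] at hq; simp [hq]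
      | succ r => simp [combS] at hq
  | cons x xs ih =>
      intro r q hq
      cases r with
      | zero =>
          simp [combS] at hq; simp [hq]
      | succ r =>
          simp only [combS, List.mem_append, List.mem_map] at hq
          rcases hq with ⟨w, hw, rfl⟩ | hq
          · exact (ih r w hw).trans (List.suffix_cons x xs)
          · exact (ih (r + 1) q hq).trans (List.suffix_cons x xs)

/-- Frontier representation of a model item: its product and its next start index. -/
def rep (n : Nat) (q : List Int × List Int) : Int × Int := (prodF q.1, (n : Int) - q.2.length)

lemma prodF_append_singleton (c : List Int) (x : Int) : prodF (c ++ [x]) = prodF c * x := by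
  simp [prodF, List.foldl_append]

lemma set_update_append (s : PySem.Set Int) (l1 l2 : List Int) :
    PySem.Set.update s (l1 ++ l2) = PySem.Set.update (PySem.Set.update s l1) l2 := by
  simp [PySem.Set.update, List.foldl_append]

lemma getD_of_drop (p : List Int) (start : Nat) (x : Int) (xs : List Int)
    (h : p.drop start = x :: xs) : p.getD start 0 = x := by
  have h0 : (p.drop start)[0]? = some x := by rw [h]; rfl
  rw [List.getElem?_drop] at h0
  have h0' : p[start]? = some x := by simpa using h0
  simp [List.getD, h0']

/-- Inner loop of B: one frontier item (product `prodF c`, start index) generates its children. -/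
lemma inner_loop (p : List Int) (c : List Int) :
    ∀ (t : List Int) (start : Nat), start + t.length = p.length → p.drop start = t →
    ∀ (st : PySem.Set Int × List (Int × Int)),
    (PySem.List.pyRange (start : Int) (p.length : Int) 1).foldl
      (fun st3 j =>
        let q := prodF c * PySem.List.pyGetD p j 0
        (PySem.Set.add st3.1 q, st3.2 ++ [(q, j + 1)])) st
    = (PySem.Set.update st.1 ((expandC (c, t)).map (fun q => prodF q.1)),
       st.2 ++ (expandC (c, t)).map (rep p.length)) := by
  intro t
  induction t with
  | nil =>
      intro start hs h st
      have hb : (p.length : Int) ≤ (start : Int) := by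
        simp at hs; omega
      rw [PySem.List.pyRange_one_eq_nil hb]
      simp [expandC, PySem.Set.update]
  | cons x xs ih =>
      intro start hs h st
      have hlt : (start : Int) < (p.length : Int) := by
        simp at hs ⊢; omega
      rw [PySem.List.pyRange_one_cons hlt]
      have hx : PySem.List.pyGetD p ((start : Nat) : Int) 0 = x := by
        rw [PySem.List.pyGetD_natCast]
        exact getD_of_drop p start x xs h
      have hdrop : p.drop (start + 1) = xs := by
        rw [← List.tail_drop, h]
        rfl
      have hs' : (start + 1) + xs.length = p.length := by
        simp at hs; omega
      have hcast : ((start : Int) + 1) = (((start + 1 : Nat)) : Int) := by push_cast; ring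
      simp only [List.foldl_cons, hx, hcast]
      rw [ih (start + 1) hs' hdrop]
      have hn : ((p.length : Int) - ((xs.length : Nat) : Int)) = ((start : Int) + 1) := by
        omega
      simp only [expandC, List.map_cons, prodF_append_singleton, rep, hn, hcast,
        List.append_assoc, List.cons_append, List.nil_append]
      rfl

/-- Middle loop of B: processing a whole frontier layer. -/
lemma middle_loop (p : List Int) :
    ∀ (M : List (List Int × List Int)), (∀ q ∈ M, q.2.IsSuffix p) →
    ∀ (out : PySem.Set Int) (acc : List (Int × Int)),
    (M.map (rep p.length)).foldl
      (fun st2 item =>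
        (PySem.List.pyRange item.2 (p.length : Int) 1).foldl
          (fun st3 j =>
            let q := item.1 * PySem.List.pyGetD p j 0
            (PySem.Set.add st3.1 q, st3.2 ++ [(q, j + 1)]))
          st2)
      (out, acc)
    = (PySem.Set.update out ((M.flatMap expandC).map (fun q => prodF q.1)),
       acc ++ (M.flatMap expandC).map (rep p.length)) := by
  intro M
  induction M with
  | nil =>
      intro _ out acc
      simp [PySem.Set.update]
  | cons m M ih =>
      intro hsuf out acc
      obtain ⟨c, t⟩ := m
      obtain ⟨u, hu⟩ : t.IsSuffix p := hsuf (c, t) (by simp)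
      have hlen : t.length ≤ p.length := by
        rw [← hu]; simp
      have hstart : ((p.length : Int) - (t.length : Int)) = (((p.length - t.length : Nat)) : Int) := by
        omega
      have hdrop : p.drop (p.length - t.length) = t := by
        have hul : u.length = p.length - t.length := by
          have := congrArg List.length hu
          simp at this; omega
        rw [← hul, ← hu]; exact List.drop_left
      simp only [List.map_cons, List.foldl_cons, rep, hstart]
      rw [inner_loop p c t (p.length - t.length) (by omega) hdrop (out, acc)]
      rw [ih (fun q hq => hsuf q (by simp [hq])) _ _]
      simp only [List.flatMap_cons, List.map_append, set_update_append, List.append_assoc]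

def bigC (p : List Int) (k : Nat) : List Int :=
  (List.range k).flatMap (fun j => (combS p (j + 1)).map (fun q => prodF q.1))

/-- Outer loop of B: invariant after k layers. -/
lemma outer_loop (p : List Int) : ∀ (k : Nat),
    (PySem.List.pyRange 0 (k : Int) 1).foldl
      (fun st _ =>
        st.2.foldl
          (fun st2 item =>
            (PySem.List.pyRange item.2 (p.length : Int) 1).foldl
              (fun st3 j =>
                let q := item.1 * PySem.List.pyGetD p j 0
                (PySem.Set.add st3.1 q, st3.2 ++ [(q, j + 1)]))
              st2)
          (st.1, ([] : List (Int × Int))))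
      ((PySem.Set.empty : PySem.Set Int), [((1 : Int), (0 : Int))])
    = (PySem.Set.update PySem.Set.empty (bigC p k), (combS p k).map (rep p.length)) := by
  intro k
  induction k with
  | zero =>
      simp [PySem.List.pyRange_one_eq_nil, bigC, combS, rep, prodF, PySem.Set.update]
  | succ k ih =>
      have hsplit : PySem.List.pyRange 0 ((k + 1 : Nat) : Int) 1 =
          PySem.List.pyRange 0 (k : Nat) 1 ++ [(k : Int)] := by
        have := PySem.List.pyRange_one_succ_right (a := 0) (b := (k : Int)) (by omega)
        push_cast
        simpa using this
      rw [hsplit, List.foldl_append, ih, List.foldl_cons, List.foldl_nil]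
      rw [middle_loop p (combS p k) (fun q hq => combS_suffix p k q hq) _ _]
      rw [combS_step p k]
      refine Prod.ext ?_ ?_
      · rw [← set_update_append]
        congr 1
        simp [bigC, List.range_succ]
      · simp

def bigA (p : List Int) (k : Nat) : List Int :=
  (List.range k).flatMap (fun j => (PySem.List.combinations p (j + 1)).map prodF)

/-- A's loop over sizes: invariant after the first k sizes. -/
lemma aside_loop (p : List Int) : ∀ (k : Nat),
    (PySem.List.pyRange 1 ((k : Int) + 1) 1).foldl
      (fun d_set i =>
        (PySem.List.combinations p i.toNat).foldl
          (fun d_set c => PySem.Set.add d_set (c.foldl (fun divider e => divider * e) 1))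
          d_set)
      PySem.Set.empty
    = PySem.Set.update PySem.Set.empty (bigA p k) := by
  intro k
  induction k with
  | zero =>
      simp [PySem.List.pyRange_one_eq_nil, bigA, PySem.Set.update]
  | succ k ih =>
      have hsplit : PySem.List.pyRange 1 (((k + 1 : Nat) : Int) + 1) 1 =
          PySem.List.pyRange 1 ((k : Int) + 1) 1 ++ [(k : Int) + 1] := by
        have := PySem.List.pyRange_one_succ_right (a := 1) (b := (k : Int) + 1) (by omega)
        push_cast
        simpa using this
      rw [hsplit, List.foldl_append, ih, List.foldl_cons, List.foldl_nil]
      have htn : ((k : Int) + 1).toNat = k + 1 := by omega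
      rw [htn]
      have hfold : (PySem.List.combinations p (k + 1)).foldl
          (fun d_set c => PySem.Set.add d_set (c.foldl (fun divider e => divider * e) 1))
          (PySem.Set.update PySem.Set.empty (bigA p k))
          = PySem.Set.update (PySem.Set.update PySem.Set.empty (bigA p k))
              ((PySem.List.combinations p (k + 1)).map prodF) := by
        simp [PySem.Set.update, List.foldl_map, prodF]
      rw [hfold, ← set_update_append]
      congr 1
      simp [bigA, List.range_succ]

lemma bigA_eq_bigC (p : List Int) (k : Nat) : bigA p k = bigC p k := by
  unfold bigA bigC
  apply List.flatMap_congr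
  intro j _
  rw [← combS_fst p (j + 1), List.map_map]
  rfl

theorem pv_main (p : List Int) : get_all_divider p = get_all_divider_alt p := by
  unfold get_all_divider get_all_divider_alt
  rw [aside_loop p p.length]
  have := outer_loop p p.length
  rw [this]
  rw [bigA_eq_bigC]

-- ===== VERDICT (by name: the statement is the Claim_ definition above) =====
theorem get_all_divider_spec : Claim_equal_get_all_divider := by
  intro p _
  exact pv_main p
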